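-- pv_equiv track=rewrite | github.com/megharana/FasoosChallange | Alfred.py | checks_rep_adjacent
-- ===== SOURCE A (Python) =====
-- def checks_rep_adjacent(check_string):
--     """
--     func description: checks whether input string is having adjacently repeatative characters
--     Return value description : Boolean
--
--     param name1: 'check_string'  --> string to check ajacent repeatative characters
--     type name1: string
--
--     """
--     count = {}
--
--     for s in check_string:
--         if s in count:
--             count[s] += 1
--         else:
--             count[s] = 1
--     list_diff_adjacent_index = []
--     for key in count:
--         if count[key] > 1:
--             # Start with this value.
--             location = -1
--             index = 0
--
--             while True:
--                 # Advance location by 1.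
--                 location = check_string.find(key, location + 1)
--
--                 # Break if not found.
--                 if location == -1: break
--
--                 # Display result.
--                 if (index != 0):
--                     list_diff_adjacent_index.append(location - index)
--
--                 index = location
--     if (list_diff_adjacent_index.__contains__(1)):
--         return True
--     else:
--         return False
-- ===== SOURCE B (Python) =====
-- def checks_rep_adjacent(check_string):
--     return any(a == b for a, b in zip(check_string, check_string[1:]))
-- ===== Notes on version B (the rewrite author's own statement) =====
-- stated objective: faster
-- what changed: Replaced the character-frequency dict plus per-character repeated str.find scans (and the gap list) by a single pass comparing each character with its successor.
-- intended difference: On strings whose only adjacent repeated pair starts at position 0 (s[0]==s[1] and no repeat later, e.g. 'aab'), A returns False because its index-nonzero guard conflates the first find iteration with a previous occurrence at index 0 and so drops the gap starting there, while B returns True, the intended answer for detecting adjacent repeated characters. — e.g. on checks_rep_adjacent("aa"): A returns false, B returns true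
import Mathlib
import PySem

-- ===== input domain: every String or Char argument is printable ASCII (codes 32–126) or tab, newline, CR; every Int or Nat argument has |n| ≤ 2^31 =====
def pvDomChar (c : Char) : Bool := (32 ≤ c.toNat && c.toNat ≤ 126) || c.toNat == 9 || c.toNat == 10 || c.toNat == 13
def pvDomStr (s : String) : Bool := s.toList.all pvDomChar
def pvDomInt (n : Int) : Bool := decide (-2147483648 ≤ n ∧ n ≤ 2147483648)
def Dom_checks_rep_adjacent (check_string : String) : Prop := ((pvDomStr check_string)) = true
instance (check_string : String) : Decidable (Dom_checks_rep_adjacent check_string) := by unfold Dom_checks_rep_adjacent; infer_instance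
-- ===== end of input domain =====

-- B replaces A's frequency dict + per-character repeated str.find scans by one pass comparing
-- each character with its successor (objective: faster, O(n) instead of O(n^2)); on strings whose
-- only adjacent repeat is at position 0 A wrongly returns False (see D_ below) and B returns True.

-- ===== PORT A =====
-- A's inner `while True:` over str.find; fuel = cs.length + 1 bounds the iterations (find strictly
-- increases `location`), so the loop is exact: the break `location == -1` always fires in time.
def pvAWhile (cs : List Char) (key : Char) : Nat → Int → Int → List Int → List Int
  | 0, _, _, acc => acc
  | fuel + 1, location, index, acc =>
    let location' := PySem.Chars.findFrom cs [key] (location + 1) none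
    if location' = -1 then acc
    else pvAWhile cs key fuel location' location'
      (if index ≠ 0 then acc ++ [location' - index] else acc)

def checks_rep_adjacent (check_string : String) : Bool :=
  let cs := check_string.toList
  let count := cs.foldl
    (fun d s => if d.contains s then d.insert s (d.getD s 0 + 1) else d.insert s 1)
    (PySem.Dict.empty : PySem.Dict Char Int)
  let list_diff_adjacent_index := count.keys.foldl
    (fun lst key =>
      if count.getD key 0 > 1 then pvAWhile cs key (cs.length + 1) (-1) 0 lst else lst)
    ([] : List Int)
  if list_diff_adjacent_index.contains (1 : Int) then true else false

-- ===== PORT B =====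
def checks_rep_adjacent_alt (check_string : String) : Bool :=
  let cs := check_string.toList
  (cs.zip cs.tail).any (fun p => p.1 == p.2)

-- ===== PRECONDITION & SPEC =====
-- On strings whose only adjacent repeated pair starts at position 0 (s[0]==s[1], no repeat later),
-- A returns False — its index-nonzero guard conflates the first find iteration with a previous
-- occurrence at index 0 and drops the gap starting there — while B returns True, the intended
-- answer for detecting adjacent repeated characters.
def D_checks_rep_adjacent (check_string : String) : Prop :=
  2 ≤ check_string.toList.length ∧
  check_string.toList[0]? = check_string.toList[1]? ∧
  List.IsChain (· ≠ ·) check_string.toList.tail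
instance (check_string : String) : Decidable (D_checks_rep_adjacent check_string) := by
  unfold D_checks_rep_adjacent; infer_instance

def Spec_checks_rep_adjacent (check_string : String) (out : Bool) : Prop :=
  ¬ D_checks_rep_adjacent check_string → out = checks_rep_adjacent_alt check_string
instance (check_string : String) (out : Bool) : Decidable (Spec_checks_rep_adjacent check_string out) := by
  unfold Spec_checks_rep_adjacent; infer_instance

def pvDiffWitness_checks_rep_adjacent : String := "aa"
def pvDiffWitnessOut_checks_rep_adjacent : Bool × Bool := (false, true)

-- ===== CLAIM (what is proved, stated in full; the proofs are below) =====
def Claim_unchanged_checks_rep_adjacent : Prop := ∀ (check_string : String), Dom_checks_rep_adjacent check_string → Spec_checks_rep_adjacent check_string (checks_rep_adjacent check_string)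
def Claim_changed_checks_rep_adjacent : Prop := Dom_checks_rep_adjacent (pvDiffWitness_checks_rep_adjacent) ∧ D_checks_rep_adjacent (pvDiffWitness_checks_rep_adjacent) ∧ checks_rep_adjacent (pvDiffWitness_checks_rep_adjacent) = pvDiffWitnessOut_checks_rep_adjacent.1 ∧ checks_rep_adjacent_alt (pvDiffWitness_checks_rep_adjacent) = pvDiffWitnessOut_checks_rep_adjacent.2 ∧ pvDiffWitnessOut_checks_rep_adjacent.1 ≠ pvDiffWitnessOut_checks_rep_adjacent.2
def Claim_exact_checks_rep_adjacent : Prop := ∀ (check_string : String), Dom_checks_rep_adjacent check_string → D_checks_rep_adjacent check_string → checks_rep_adjacent check_string ≠ checks_rep_adjacent_alt check_string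

-- ===== LEMMAS AND PROOFS =====

-- `[a]` is a prefix of `l` exactly when `a` is the head.
lemma single_prefix_iff {a : Char} {l : List Char} : [a] <+: l ↔ l[0]? = some a := by
  cases l with
  | nil => simp
  | cons x t =>
    constructor
    · rintro ⟨u, hu⟩; simp at hu; simp [hu.1]
    · intro h; simp at h; exact ⟨t, by simp [h]⟩

lemma single_prefix_drop_iff {a : Char} {l : List Char} {j : Nat} :
    [a] <+: l.drop j ↔ l[j]? = some a := by
  rw [single_prefix_iff, List.getElem?_drop, Nat.add_zero]

-- the `while True:` loop from an occurrence p: appends `1` iff some adjacent pair of `key`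
-- starts at a position ≥ p that is ≥ 1
lemma one_mem_pvAWhile (cs : List Char) (key : Char) (fuel : Nat) (p : Nat) (acc : List Int)
    (hp : cs[p]? = some key) (hfuel : cs.length ≤ fuel + p) :
    ((1 : Int) ∈ pvAWhile cs key fuel (p : Int) (p : Int) acc) ↔
      ((1 : Int) ∈ acc ∨ ∃ i : Nat, p ≤ i ∧ 1 ≤ i ∧ cs[i]? = some key ∧ cs[i + 1]? = some key) := by
  induction fuel generalizing p acc with
  | zero =>
    have : p < cs.length := (List.getElem?_eq_some_iff.mp hp).1
    omega
  | succ fuel ih =>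
    have hplen : p < cs.length := (List.getElem?_eq_some_iff.mp hp).1
    have hk1 : p + 1 ≤ cs.length := by omega
    have hcast : (p : Int) + 1 = ((p + 1 : Nat) : Int) := by push_cast; ring
    rw [pvAWhile, hcast]
    by_cases hneg : PySem.Chars.findFrom cs [key] ((p + 1 : Nat) : Int) none = -1
    · simp only [hneg]
      have hno : ¬ ([key] <:+: cs.drop (p + 1)) :=
        (PySem.Chars.findFrom_natCast_eq_neg_one_iff cs [key] (p + 1) hk1).mp hneg
      constructor
      · intro h; exact Or.inl h
      · rintro (h | ⟨i, hpi, h1, hi, hi1⟩)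
        · exact h
        · exfalso
          apply hno
          rw [← (PySem.Chars.exists_prefix_drop_iff_isIn _ _).trans
            (PySem.Chars.isIn_iff_infix _ _)]
          rcases Nat.eq_or_lt_of_le hpi with heq | hlt
          · exact ⟨0, by rw [List.drop_drop]; exact single_prefix_drop_iff.mpr (heq ▸ hi1)⟩
          · exact ⟨i - (p + 1), by
              rw [List.drop_drop]
              have : p + 1 + (i - (p + 1)) = i := by omega
              rw [this]; exact single_prefix_drop_iff.mpr hi⟩
    · obtain ⟨hle, hpre, hmin⟩ :=
        PySem.Chars.findFrom_natCast_spec cs [key] (p + 1) hk1 hneg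
      set r := PySem.Chars.findFrom cs [key] ((p + 1 : Nat) : Int) none with hr
      have hr0 : 0 ≤ r := le_trans (by positivity) hle
      set q := r.toNat with hq
      have hrq : r = (q : Int) := (Int.toNat_of_nonneg hr0).symm
      have hqge : p + 1 ≤ q := by omega
      have hqocc : cs[q]? = some key := single_prefix_drop_iff.mp hpre
      have hmin' : ∀ j : Nat, p + 1 ≤ j → j < q → cs[j]? ≠ some key := by
        intro j h1 h2 hj
        exact hmin j h1 h2 (single_prefix_drop_iff.mpr hj)
      simp only [if_neg hneg]
      rw [hrq]
      have hfuel' : cs.length ≤ fuel + q := by omega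
      rw [ih q _ hqocc hfuel']
      have hacc' : ((1 : Int) ∈ (if ((p : Int) ≠ 0) then acc ++ [(q : Int) - (p : Int)] else acc)) ↔
          ((1 : Int) ∈ acc ∨ (1 ≤ p ∧ q = p + 1)) := by
        by_cases hp0 : p = 0
        · subst hp0; simp
        · rw [if_pos (by exact_mod_cast hp0)]
          simp only [List.mem_append, List.mem_singleton]
          constructor
          · rintro (h | h)
            · exact Or.inl h
            · exact Or.inr ⟨by omega, by omega⟩
          · rintro (h | ⟨_, h⟩)
            · exact Or.inl h
            · right; omega
      rw [hacc']
      constructor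
      · rintro ((h | ⟨h1, h2⟩) | ⟨i, hqi, h1, hi, hi1⟩)
        · exact Or.inl h
        · exact Or.inr ⟨p, le_refl p, h1, hp, h2 ▸ hqocc⟩
        · exact Or.inr ⟨i, by omega, h1, hi, hi1⟩
      · rintro (h | ⟨i, hpi, h1, hi, hi1⟩)
        · exact Or.inl (Or.inl h)
        · rcases Nat.eq_or_lt_of_le hpi with heq | hlt
          · -- i = p : the very next found occurrence is p+1
            have hocc1 : cs[p + 1]? = some key := heq ▸ hi1
            have hqp : q = p + 1 := by
              by_contra hne
              exact hmin' (p + 1) (le_refl _) (by omega) hocc1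
            exact Or.inl (Or.inr ⟨heq ▸ h1, hqp⟩)
          · -- i > p : i ≥ q by minimality of q
            have : q ≤ i := by
              by_contra hne
              exact hmin' i (by omega) (by omega) hi
            exact Or.inr ⟨i, this, h1, hi, hi1⟩

-- the loop started as A starts it (location = -1, index = 0)
lemma one_mem_pvAWhile_start (cs : List Char) (key : Char) (acc : List Int) :
    ((1 : Int) ∈ pvAWhile cs key (cs.length + 1) (-1) 0 acc) ↔
      ((1 : Int) ∈ acc ∨ ∃ i : Nat, 1 ≤ i ∧ cs[i]? = some key ∧ cs[i + 1]? = some key) := by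
  rw [pvAWhile]
  have h0 : (-1 : Int) + 1 = 0 := by ring
  rw [h0, PySem.Chars.findFrom_zero]
  by_cases hneg : PySem.Chars.find cs [key] = -1
  · simp only [hneg]
    have hno : ¬ ([key] <:+: cs) := (PySem.Chars.find_eq_neg_one_iff cs [key]).mp hneg
    constructor
    · exact Or.inl
    · rintro (h | ⟨i, _, hi, _⟩)
      · exact h
      · exact absurd ((PySem.Chars.exists_prefix_drop_iff_isIn _ _).trans
          (PySem.Chars.isIn_iff_infix _ _) |>.mp ⟨i, single_prefix_drop_iff.mpr hi⟩) hno
  · simp only [if_neg hneg]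
    have hr0 : 0 ≤ PySem.Chars.find cs [key] := by
      rcases (PySem.Chars.neg_one_le_find cs [key]).lt_or_eq with h | h
      · omega
      · exact absurd h.symm hneg
    obtain ⟨hpre, hmin⟩ := PySem.Chars.find_spec hr0
    set q := (PySem.Chars.find cs [key]).toNat with hq
    have hrq : PySem.Chars.find cs [key] = (q : Int) := (Int.toNat_of_nonneg hr0).symm
    have hqocc : cs[q]? = some key := single_prefix_drop_iff.mp hpre
    have hmin' : ∀ j : Nat, j < q → cs[j]? ≠ some key := by
      intro j h2 hj
      exact hmin j h2 (single_prefix_drop_iff.mpr hj)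
    have hqlen : q < cs.length := (List.getElem?_eq_some_iff.mp hqocc).1
    rw [if_neg (by simp), hrq,
      one_mem_pvAWhile cs key cs.length q acc hqocc (by omega)]
    constructor
    · rintro (h | ⟨i, _, h1, hi, hi1⟩)
      · exact Or.inl h
      · exact Or.inr ⟨i, h1, hi, hi1⟩
    · rintro (h | ⟨i, h1, hi, hi1⟩)
      · exact Or.inl h
      · refine Or.inr ⟨i, ?_, h1, hi, hi1⟩
        by_contra hne
        exact hmin' i (by omega) hi

-- A's counting loop is collections.Counter
lemma count_loop_eq_counter (cs : List Char) :
    cs.foldl (fun d s => if d.contains s then d.insert s (d.getD s 0 + 1) else d.insert s 1)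
      PySem.Dict.empty = PySem.Dict.counter cs := by
  rw [← PySem.Dict.foldl_insert_getD_add_one_eq_counter]
  congr 1
  funext d s
  by_cases h : d.contains s
  · rw [if_pos h]
  · rw [if_neg h]
    have hc : d.contains s = false := by simpa using h
    have hget : d.get? s = none := by
      have := PySem.Dict.contains_eq_isSome_get? d s
      rw [hc] at this
      exact Option.not_isSome_iff_eq_none.mp (by simp [← this])
    have hz : d.getD s 0 = 0 := by simp [PySem.Dict.getD, hget]
    rw [hz]
    norm_num

-- A's second loop, folded over the dict's keys
lemma one_mem_keys_fold (cs : List Char) (count : PySem.Dict Char Int) (ks : List Char)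
    (acc : List Int) :
    ((1 : Int) ∈ ks.foldl (fun lst key =>
        if count.getD key 0 > 1 then pvAWhile cs key (cs.length + 1) (-1) 0 lst else lst) acc) ↔
      ((1 : Int) ∈ acc ∨ ∃ key ∈ ks, count.getD key 0 > 1 ∧
        ∃ i : Nat, 1 ≤ i ∧ cs[i]? = some key ∧ cs[i + 1]? = some key) := by
  induction ks generalizing acc with
  | nil => simp
  | cons k t iht =>
    simp only [List.foldl_cons, List.mem_cons]
    rw [iht]
    by_cases hk : count.getD k 0 > 1
    · rw [if_pos hk, one_mem_pvAWhile_start]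
      constructor
      · rintro ((h | ⟨i, h1, hi, hi1⟩) | ⟨key, hm, hc, hp⟩)
        · exact Or.inl h
        · exact Or.inr ⟨k, Or.inl rfl, hk, i, h1, hi, hi1⟩
        · exact Or.inr ⟨key, Or.inr hm, hc, hp⟩
      · rintro (h | ⟨key, (rfl | hm), hc, hp⟩)
        · exact Or.inl (Or.inl h)
        · exact Or.inl (Or.inr hp)
        · exact Or.inr ⟨key, hm, hc, hp⟩
    · rw [if_neg hk]
      constructor
      · rintro (h | ⟨key, hm, hc, hp⟩)
        · exact Or.inl h
        · exact Or.inr ⟨key, Or.inr hm, hc, hp⟩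
      · rintro (h | ⟨key, (rfl | hm), hc, hp⟩)
        · exact Or.inl h
        · exact absurd hc hk
        · exact Or.inr ⟨key, hm, hc, hp⟩

-- a pair of adjacent equal characters means that character occurs at least twice
lemma two_le_count_of_adjacent {cs : List Char} {i : Nat} {c : Char}
    (hi : cs[i]? = some c) (hi1 : cs[i + 1]? = some c) : 2 ≤ cs.count c := by
  have h1 : i + 1 < cs.length := (List.getElem?_eq_some_iff.mp hi1).1
  have hdrop : cs.drop i = c :: c :: cs.drop (i + 2) := by
    rw [List.drop_eq_getElem_cons (by omega)]
    congr 1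
    · exact (List.getElem?_eq_some_iff.mp hi).2.symm ▸ rfl
    · rw [List.drop_eq_getElem_cons (by omega : i + 1 < cs.length)]
      congr 1
      exact (List.getElem?_eq_some_iff.mp hi1).2.symm ▸ rfl
  calc 2 ≤ (cs.drop i).count c := by rw [hdrop]; simp
    _ ≤ cs.count c := (List.drop_sublist i cs).count_le c

-- the third conjunct of D_: no adjacent repeated pair starts at a position ≥ 1
lemma isChain_tail_iff (cs : List Char) :
    List.IsChain (· ≠ ·) cs.tail ↔
      ∀ i : Nat, 1 ≤ i → ∀ h : i + 1 < cs.length, cs[i] ≠ cs[i + 1] := by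
  rw [List.isChain_iff_getElem]
  constructor
  · intro hch i h1 h
    have hlt : (i - 1) + 1 < cs.tail.length := by simp [List.length_tail]; omega
    have := hch (i - 1) hlt
    rw [List.getElem_tail, List.getElem_tail] at this
    have e1 : i - 1 + 1 = i := by omega
    simp only [e1] at this
    exact this
  · intro hall i hi
    rw [List.getElem_tail, List.getElem_tail]
    have hlen : i + 1 + 1 < cs.length := by
      have := hi; simp [List.length_tail] at this; omega
    exact hall (i + 1) (by omega) hlen

-- characterisation of A: true iff some adjacent repeated pair starts at position ≥ 1
lemma checks_rep_adjacent_iff (s : String) :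
    checks_rep_adjacent s = true ↔
      ∃ i : Nat, 1 ≤ i ∧ ∃ c : Char,
        s.toList[i]? = some c ∧ s.toList[i + 1]? = some c := by
  unfold checks_rep_adjacent
  simp only [count_loop_eq_counter]
  set cs := s.toList with hcs
  have hsplit : ∀ b : Bool, (if b = true then true else false) = b := by decide
  rw [hsplit]
  rw [List.contains_iff_mem, one_mem_keys_fold]
  simp only [List.not_mem_nil, false_or, PySem.Dict.keys_counter, PySem.Set.mem_ofList,
    PySem.Dict.getD_counter]
  constructor
  · rintro ⟨key, _, _, i, h1, hi, hi1⟩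
    exact ⟨i, h1, key, hi, hi1⟩
  · rintro ⟨i, h1, c, hi, hi1⟩
    refine ⟨c, List.mem_of_getElem? hi, ?_, i, h1, hi, hi1⟩
    have := two_le_count_of_adjacent hi hi1
    exact_mod_cast this

-- characterisation of B: true iff some adjacent repeated pair exists
lemma checks_rep_adjacent_alt_iff (s : String) :
    checks_rep_adjacent_alt s = true ↔
      ∃ i : Nat, ∃ c : Char, s.toList[i]? = some c ∧ s.toList[i + 1]? = some c := by
  unfold checks_rep_adjacent_alt
  set cs := s.toList with hcs
  rw [List.any_eq_true]
  constructor
  · rintro ⟨x, hmem, hx⟩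
    obtain ⟨j, hj, hxj⟩ := List.mem_iff_getElem.mp hmem
    have hjlen : j < cs.length ∧ j < cs.tail.length := by
      have := hj; rw [List.length_zip] at this; omega
    rw [List.getElem_zip] at hxj
    have hab : cs[j]'hjlen.1 = cs.tail[j]'hjlen.2 := by
      have := hx; rw [← hxj] at this; simpa using this
    refine ⟨j, cs[j]'hjlen.1, List.getElem?_eq_getElem hjlen.1, ?_⟩
    rw [hab, List.getElem_tail]
    exact List.getElem?_eq_getElem (by have := hjlen.2; simp [List.length_tail] at this; omega)
  · rintro ⟨i, c, hi, hi1⟩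
    have h1 : i + 1 < cs.length := (List.getElem?_eq_some_iff.mp hi1).1
    have hit : i < cs.tail.length := by simp [List.length_tail]; omega
    have hiz : i < (cs.zip cs.tail).length := by rw [List.length_zip]; simp [List.length_tail]; omega
    refine ⟨(cs.zip cs.tail)[i]'hiz, List.getElem_mem hiz, ?_⟩
    rw [List.getElem_zip]
    have e1 : cs[i]'(by omega) = c := by
      have := List.getElem?_eq_getElem (l := cs) (i := i) (by omega)
      rw [hi] at this; exact (Option.some_injective _ this).symm
    have e2 : cs.tail[i]'hit = c := by
      rw [List.getElem_tail]
      have := List.getElem?_eq_getElem (l := cs) (i := i + 1) h1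
      rw [hi1] at this; exact (Option.some_injective _ this).symm
    simp [e1, e2]

-- ===== VERDICT (by name: the statement is the Claim_ definition above) =====
theorem checks_rep_adjacent_spec : Claim_unchanged_checks_rep_adjacent := by
  intro s _ 
  unfold Spec_checks_rep_adjacent
  intro hD
  cases hb : checks_rep_adjacent_alt s with
  | false =>
    apply Bool.eq_false_iff.mpr
    intro hA
    obtain ⟨i, h1, c, hi, hi1⟩ := (checks_rep_adjacent_iff s).mp hA
    have : checks_rep_adjacent_alt s = true := (checks_rep_adjacent_alt_iff s).mpr ⟨i, c, hi, hi1⟩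
    rw [hb] at this; exact absurd this (by simp)
  | true =>
    obtain ⟨i, c, hi, hi1⟩ := (checks_rep_adjacent_alt_iff s).mp hb
    apply (checks_rep_adjacent_iff s).mpr
    by_cases h1 : 1 ≤ i
    · exact ⟨i, h1, c, hi, hi1⟩
    · have hi0 : i = 0 := by omega
      subst hi0
      have hlen : 2 ≤ s.toList.length := (List.getElem?_eq_some_iff.mp hi1).1
      have h01 : s.toList[0]? = s.toList[1]? := by rw [hi, hi1]
      unfold D_checks_rep_adjacent at hD
      push Not at hD
      have hnc : ¬ List.IsChain (· ≠ ·) s.toList.tail := hD hlen h01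
      rw [isChain_tail_iff] at hnc
      push Not at hnc
      obtain ⟨j, hj1, hjlt, hjeq⟩ := hnc
      refine ⟨j, hj1, s.toList[j]'(by omega), List.getElem?_eq_getElem (by omega), ?_⟩
      rw [hjeq]; exact List.getElem?_eq_getElem hjlt

theorem checks_rep_adjacent_changed : Claim_changed_checks_rep_adjacent := by
  unfold Claim_changed_checks_rep_adjacent; decide

theorem checks_rep_adjacent_tight : Claim_exact_checks_rep_adjacent := by
  intro s _ hD
  obtain ⟨hlen, h01, hrest⟩ := hD
  have hBt : checks_rep_adjacent_alt s = true := by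
    apply (checks_rep_adjacent_alt_iff s).mpr
    have h0 : s.toList[0]? = some (s.toList[0]'(by omega)) := List.getElem?_eq_getElem (by omega)
    exact ⟨0, s.toList[0]'(by omega), h0, by rw [← h01]; exact h0⟩
  have hAf : checks_rep_adjacent s = false := by
    apply Bool.eq_false_iff.mpr
    intro hA
    obtain ⟨i, h1, c, hi, hi1⟩ := (checks_rep_adjacent_iff s).mp hA
    have h2 : i + 1 < s.toList.length := (List.getElem?_eq_some_iff.mp hi1).1
    have e1 : s.toList[i]'(by omega) = c := (List.getElem?_eq_some_iff.mp hi).2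
    have e2 : s.toList[i + 1]'h2 = c := (List.getElem?_eq_some_iff.mp hi1).2
    exact (isChain_tail_iff s.toList).mp hrest i h1 h2 (by rw [e1, e2])
  rw [hBt, hAf]; simp
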